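-- pv_equiv track=rewrite | github.com/sushantkapse/python | Random Password.py | querty_layout
-- ===== SOURCE A (Python) =====
-- def querty_layout(password,score):
--     new_password = password.lower()
--     querty_list = ['qwertyuiop','asdfghjkl','zxcvbnm']
--     for i in range(len(new_password)-2):
--         letter_1 = new_password[i]
--         letter_2 = new_password[i + 1]
--         letter_3 = new_password[i + 2]
--
--
--         if (letter_1 in querty_list[1] and letter_2 in querty_list[1] and letter_3 in querty_list[1]) or (letter_1 in querty_list[0] and letter_2 in querty_list[0] and letter_3 in querty_list[0]) or (letter_1 in querty_list[2] and letter_2 in querty_list[2] and letter_3 in querty_list[2]) :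
--             score -= 5
--
--     return score
-- ===== SOURCE B (Python) =====
-- def querty_layout(password, score):
--     rows = ['qwertyuiop', 'asdfghjkl', 'zxcvbnm']
--     def row_of(ch):
--         for r, letters in enumerate(rows):
--             if ch in letters:
--                 return r
--         return None
--     cur = None
--     run = 0
--     for ch in password.lower():
--         r = row_of(ch)
--         if r is not None and r == cur:
--             run += 1
--         else:
--             score -= 5 * max(0, run - 2)
--             cur = r
--             run = 1 if r is not None else 0
--     score -= 5 * max(0, run - 2)
--     return score
-- ===== Notes on version B (the rewrite author's own statement) =====
-- stated objective: alternative
-- what changed: B maps each lowered character to its keyboard-row index once and does a single run-length pass, charging 5*max(0, L-2) per maximal same-row run, instead of A's per-index re-test of every 3-character window against the three row strings.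
import Mathlib
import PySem

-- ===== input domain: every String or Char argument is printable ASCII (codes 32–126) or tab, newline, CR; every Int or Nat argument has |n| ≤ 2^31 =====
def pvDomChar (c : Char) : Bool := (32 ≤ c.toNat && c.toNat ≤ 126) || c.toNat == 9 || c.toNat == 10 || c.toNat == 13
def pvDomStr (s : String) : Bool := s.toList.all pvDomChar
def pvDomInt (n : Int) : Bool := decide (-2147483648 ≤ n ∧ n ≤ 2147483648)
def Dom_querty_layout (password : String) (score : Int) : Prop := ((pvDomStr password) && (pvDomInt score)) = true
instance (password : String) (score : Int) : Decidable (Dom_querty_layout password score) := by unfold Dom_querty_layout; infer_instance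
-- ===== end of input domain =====

-- B replaces A's per-window triple-membership test by a single pass over keyboard-row indices
-- that penalizes each maximal same-row run of length L by 5*max(0, L-2) (objective: alternative).

-- ===== PORT A =====
-- port of A: loop over i in range(len-2), testing each 3-char window for membership in one row;
-- 'letter in row' is Python substring membership, exact as list membership since letter is one char
def querty_layout (password : String) (score : Int) : Int :=
  let new_password := (PySem.Str.lower password).toList
  let querty_list : List String := ["qwertyuiop", "asdfghjkl", "zxcvbnm"]
  (PySem.List.pyRange 0 ((new_password.length : Int) - 2) 1).foldl
    (fun score i =>
      let letter_1 := PySem.List.pyGetD new_password i ' '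
      let letter_2 := PySem.List.pyGetD new_password (i + 1) ' '
      let letter_3 := PySem.List.pyGetD new_password (i + 2) ' '
      if ((PySem.List.pyGetD querty_list 1 "").toList.contains letter_1 &&
          (PySem.List.pyGetD querty_list 1 "").toList.contains letter_2 &&
          (PySem.List.pyGetD querty_list 1 "").toList.contains letter_3) ||
         ((PySem.List.pyGetD querty_list 0 "").toList.contains letter_1 &&
          (PySem.List.pyGetD querty_list 0 "").toList.contains letter_2 &&
          (PySem.List.pyGetD querty_list 0 "").toList.contains letter_3) ||
         ((PySem.List.pyGetD querty_list 2 "").toList.contains letter_1 &&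
          (PySem.List.pyGetD querty_list 2 "").toList.contains letter_2 &&
          (PySem.List.pyGetD querty_list 2 "").toList.contains letter_3)
      then score - 5 else score)
    score

-- ===== PORT B =====
-- port of B's helper row_of: first row index containing ch, else None ('ch in letters' is
-- single-char membership, exact as list membership)
def pvRowOf (ch : Char) : Option Int :=
  if ("qwertyuiop".toList.contains ch) then some 0
  else if ("asdfghjkl".toList.contains ch) then some 1
  else if ("zxcvbnm".toList.contains ch) then some 2
  else none

-- port of B's single pass: state (cur, run, score); a finished run of L same-row chars costs 5*max(0,L-2)
def pvRunLoop : List Char → Option Int → Int → Int → Int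
  | [], _, run, score => score - 5 * max 0 (run - 2)
  | ch :: rest, cur, run, score =>
    let r := pvRowOf ch
    if r.isSome && r == cur then
      pvRunLoop rest cur (run + 1) score
    else
      pvRunLoop rest r (if r.isSome then 1 else 0) (score - 5 * max 0 (run - 2))

def querty_layout_alt (password : String) (score : Int) : Int :=
  pvRunLoop (PySem.Str.lower password).toList none 0 score

-- ===== PRECONDITION & SPEC =====
def Spec_querty_layout (password : String) (score : Int) (out : Int) : Prop := out = querty_layout_alt password score
instance (password : String) (score : Int) (out : Int) : Decidable (Spec_querty_layout password score out) := by unfold Spec_querty_layout; infer_instance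

-- ===== CLAIM (what is proved, stated in full; the proofs are below) =====
def Claim_equal_querty_layout : Prop := ∀ (password : String) (score : Int), Dom_querty_layout password score → Spec_querty_layout password score (querty_layout password score)

-- ===== LEMMAS AND PROOFS =====

-- number of windows of three consecutive equal, non-none row indices
def pvRcnt : List (Option Int) → Int
  | x :: y :: z :: t => (if x.isSome ∧ x = y ∧ y = z then 1 else 0) + pvRcnt (y :: z :: t)
  | _ => 0

lemma pvR1 : "asdfghjkl".toList = ['a','s','d','f','g','h','j','k','l'] := by decide
lemma pvR2 : "zxcvbnm".toList = ['z','x','c','v','b','n','m'] := by decide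

-- the three rows are pairwise disjoint
lemma pvDisj01 (c : Char) (h : ("asdfghjkl".toList.contains c) = true) :
    ("qwertyuiop".toList.contains c) = false := by
  rw [pvR1, List.contains_iff_mem] at h; fin_cases h <;> decide

lemma pvDisj02 (c : Char) (h : ("zxcvbnm".toList.contains c) = true) :
    ("qwertyuiop".toList.contains c) = false := by
  rw [pvR2, List.contains_iff_mem] at h; fin_cases h <;> decide

lemma pvDisj12 (c : Char) (h : ("zxcvbnm".toList.contains c) = true) :
    ("asdfghjkl".toList.contains c) = false := by
  rw [pvR2, List.contains_iff_mem] at h; fin_cases h <;> decide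

lemma pvRowOf0 (c : Char) : pvRowOf c = some 0 ↔ ("qwertyuiop".toList.contains c) = true := by
  constructor
  · intro h; unfold pvRowOf at h; split_ifs at h with h0 h1 h2 <;> simp_all
  · intro h; unfold pvRowOf; rw [if_pos h]

lemma pvRowOf1 (c : Char) : pvRowOf c = some 1 ↔ ("asdfghjkl".toList.contains c) = true := by
  constructor
  · intro h; unfold pvRowOf at h; split_ifs at h with h0 h1 h2 <;> simp_all
  · intro h; unfold pvRowOf
    rw [if_neg (by rw [pvDisj01 c h]; simp), if_pos h]

lemma pvRowOf2 (c : Char) : pvRowOf c = some 2 ↔ ("zxcvbnm".toList.contains c) = true := by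
  constructor
  · intro h; unfold pvRowOf at h; split_ifs at h with h0 h1 h2 <;> simp_all
  · intro h; unfold pvRowOf
    rw [if_neg (by rw [pvDisj02 c h]; simp), if_neg (by rw [pvDisj12 c h]; simp), if_pos h]

lemma pvRowOf_cases (c : Char) :
    pvRowOf c = none ∨ pvRowOf c = some 0 ∨ pvRowOf c = some 1 ∨ pvRowOf c = some 2 := by
  unfold pvRowOf; split_ifs <;> simp

-- A's window test holds iff the three chars have equal, defined row indices
lemma pvCondIff (a b c : Char) :
    ((("asdfghjkl".toList.contains a) && ("asdfghjkl".toList.contains b) && ("asdfghjkl".toList.contains c)) ||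
     (("qwertyuiop".toList.contains a) && ("qwertyuiop".toList.contains b) && ("qwertyuiop".toList.contains c)) ||
     (("zxcvbnm".toList.contains a) && ("zxcvbnm".toList.contains b) && ("zxcvbnm".toList.contains c))) = true
    ↔ ((pvRowOf a).isSome ∧ pvRowOf a = pvRowOf b ∧ pvRowOf b = pvRowOf c) := by
  constructor
  · intro h
    simp only [Bool.or_eq_true, Bool.and_eq_true] at h
    rcases h with (⟨⟨ha, hb⟩, hc⟩ | ⟨⟨ha, hb⟩, hc⟩) | ⟨⟨ha, hb⟩, hc⟩
    · rw [← pvRowOf1] at ha hb hc; simp [ha, hb, hc]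
    · rw [← pvRowOf0] at ha hb hc; simp [ha, hb, hc]
    · rw [← pvRowOf2] at ha hb hc; simp [ha, hb, hc]
  · rintro ⟨hs, hab, hbc⟩
    simp only [Bool.or_eq_true, Bool.and_eq_true]
    rcases pvRowOf_cases a with h | h | h | h
    · rw [h] at hs; simp at hs
    · exact Or.inl (Or.inr ⟨⟨(pvRowOf0 a).1 h, (pvRowOf0 b).1 (hab ▸ h)⟩,
        (pvRowOf0 c).1 (hbc ▸ hab ▸ h)⟩)
    · exact Or.inl (Or.inl ⟨⟨(pvRowOf1 a).1 h, (pvRowOf1 b).1 (hab ▸ h)⟩,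
        (pvRowOf1 c).1 (hbc ▸ hab ▸ h)⟩)
    · exact Or.inr ⟨⟨(pvRowOf2 a).1 h, (pvRowOf2 b).1 (hab ▸ h)⟩,
        (pvRowOf2 c).1 (hbc ▸ hab ▸ h)⟩

-- ---------- A side: the indexed window loop computes score - 5 * pvRcnt ----------

-- Nat-indexed version of A's loop, condition already phrased through pvRowOf
def pvAFoldNat (l : List Char) (s : Int) : Int :=
  (List.range (l.length - 2)).foldl
    (fun s k =>
      if (pvRowOf (l.getD k ' ')).isSome ∧ pvRowOf (l.getD k ' ') = pvRowOf (l.getD (k+1) ' ')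
          ∧ pvRowOf (l.getD (k+1) ' ') = pvRowOf (l.getD (k+2) ' ')
      then s - 5 else s)
    s

lemma pvAFoldNat_eq : ∀ (l : List Char) (s : Int),
    pvAFoldNat l s = s - 5 * pvRcnt (l.map pvRowOf)
  | [], s => by simp [pvAFoldNat, pvRcnt]
  | [a], s => by simp [pvAFoldNat, pvRcnt]
  | [a, b], s => by simp [pvAFoldNat, pvRcnt]
  | a :: b :: c :: u, s => by
    have ih := pvAFoldNat_eq (b :: c :: u)
    simp only [pvAFoldNat, List.length_cons] at ih ⊢
    rw [show u.length + 1 + 1 + 1 - 2 = (u.length + 1 + 1 - 2) + 1 by omega,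
        List.range_succ_eq_map, List.foldl_cons, List.foldl_map]
    simp only [List.getD_cons_zero, List.getD_cons_succ, Nat.succ_eq_add_one] at ih ⊢
    rw [ih]
    simp only [List.map_cons, pvRcnt]
    split_ifs <;> ring

-- ---------- B side: the run loop computes score - 5 * pvRowRun ----------

-- pvRunLoop's run accounting, on the row-index list
def pvRowRun : List (Option Int) → Option Int → Int → Int
  | [], _, run => max 0 (run - 2)
  | r :: rest, cur, run =>
    if r.isSome ∧ r = cur then pvRowRun rest cur (run + 1)
    else max 0 (run - 2) + pvRowRun rest r (if r.isSome then 1 else 0)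

lemma pvRunLoop_eq : ∀ (l : List Char) (cur : Option Int) (run score : Int),
    pvRunLoop l cur run score = score - 5 * pvRowRun (l.map pvRowOf) cur run
  | [], cur, run, score => by simp [pvRunLoop, pvRowRun]
  | ch :: rest, cur, run, score => by
    simp only [pvRunLoop, pvRowRun, List.map_cons]
    by_cases h : (pvRowOf ch).isSome ∧ pvRowOf ch = cur
    · rw [if_pos h, if_pos (by simp [h.1, ← h.2]), pvRunLoop_eq]
    · rw [if_neg h, if_neg (by simpa using h), pvRunLoop_eq]
      ring

-- ---------- counting windows by runs ----------

lemma pvRcnt_none_cons (t : List (Option Int)) : pvRcnt (none :: t) = pvRcnt t := by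
  match t with
  | [] => rfl
  | [z] => rfl
  | z :: w :: u => simp [pvRcnt]

lemma pvRcnt_cons_ne (ρ : Int) (a : Option Int) (t : List (Option Int)) (ha : a ≠ some ρ) :
    pvRcnt (some ρ :: a :: t) = pvRcnt (a :: t) := by
  match t with
  | [] => rfl
  | z :: u =>
    simp only [pvRcnt]
    rw [if_neg (by rintro ⟨-, h, -⟩; exact ha h.symm)]
    ring

lemma pvRcnt_replicate (m : Nat) (ρ : Int) :
    pvRcnt (List.replicate (m + 2) (some ρ)) = m := by
  induction m with
  | zero => rfl
  | succ m ih =>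
    have h3 : List.replicate (m + 3) (some ρ)
        = some ρ :: List.replicate (m + 2) (some ρ) := by simp [List.replicate_succ]
    have h2 : List.replicate (m + 2) (some ρ)
        = some ρ :: List.replicate (m + 1) (some ρ) := by simp [List.replicate_succ]
    have h1 : List.replicate (m + 1) (some ρ)
        = some ρ :: List.replicate m (some ρ) := by simp [List.replicate_succ]
    rw [show m + 1 + 2 = m + 3 by omega, h3, h2, h1, pvRcnt]
    rw [← h1, ← h2, ih]
    simp
    omega

lemma pvRcnt_replicate_int (k : Int) (ρ : Int) (hk : 0 ≤ k) :
    pvRcnt (List.replicate k.toNat (some ρ)) = max 0 (k - 2) := by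
  match hm : k.toNat with
  | 0 => simp [pvRcnt]; omega
  | 1 => simp [pvRcnt]; omega
  | m + 2 => rw [pvRcnt_replicate]; omega

lemma pvRcnt_replicate_append (m : Nat) (ρ : Int) (a : Option Int) (t : List (Option Int))
    (ha : a ≠ some ρ) :
    pvRcnt (List.replicate m (some ρ) ++ a :: t) = max 0 ((m : Int) - 2) + pvRcnt (a :: t) := by
  match m with
  | 0 => simp
  | 1 => simp [pvRcnt_cons_ne ρ a t ha]
  | m + 2 =>
    induction m with
    | zero =>
      simp only [List.replicate_succ, List.replicate_zero, List.nil_append, List.cons_append,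
        pvRcnt]
      rw [if_neg (by rintro ⟨-, -, h⟩; exact ha h.symm),
          pvRcnt_cons_ne ρ a t ha]
      norm_num
    | succ m ih =>
      have h : List.replicate (m + 1 + 2) (some ρ) ++ a :: t
          = some ρ :: (List.replicate (m + 2) (some ρ) ++ a :: t) := by
        simp [List.replicate_succ]
      have h2 : List.replicate (m + 2) (some ρ) ++ a :: t
          = some ρ :: some ρ :: (List.replicate m (some ρ) ++ a :: t) := by
        simp [List.replicate_succ]
      rw [h, h2, pvRcnt, if_pos (by simp), ← h2, ih]
      push_cast
      omega

-- the central identity: run accounting equals window counting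
lemma pvMain : ∀ rs : List (Option Int),
    (pvRowRun rs none 0 = pvRcnt rs) ∧
    (∀ ρ k, 1 ≤ k → pvRowRun rs (some ρ) k = pvRcnt (List.replicate k.toNat (some ρ) ++ rs))
  | [] => by
    refine ⟨rfl, fun ρ k hk => ?_⟩
    rw [List.append_nil, pvRcnt_replicate_int k ρ (by omega)]
    rfl
  | r :: t => by
    obtain ⟨ih1, ih2⟩ := pvMain t
    have tail_eq : pvRowRun t r (if r.isSome then 1 else 0) = pvRcnt (r :: t) := by
      match r with
      | none => simpa [pvRcnt_none_cons] using ih1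
      | some σ => simpa using ih2 σ 1 le_rfl
    constructor
    · rw [pvRowRun, if_neg (by rintro ⟨h1, h2⟩; rw [h2] at h1; simp at h1)]
      simpa using tail_eq
    · intro ρ k hk
      rw [pvRowRun]
      by_cases h : r.isSome ∧ r = some ρ
      · rw [if_pos (by exact ⟨h.1, h.2⟩), h.2]
        rw [ih2 ρ (k + 1) (by omega)]
        rw [show (k + 1).toNat = k.toNat + 1 by omega, List.replicate_succ',
          List.append_assoc, List.singleton_append]
      · have hne : r ≠ some ρ := by
          intro hr; exact h ⟨by simp [hr], hr⟩
        rw [if_neg h, tail_eq,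
          pvRcnt_replicate_append k.toNat ρ r t hne,
          show ((k.toNat : Int)) = k by omega]

-- ---------- bridging port A to pvAFoldNat ----------

lemma pvQl1 : PySem.List.pyGetD ["qwertyuiop", "asdfghjkl", "zxcvbnm"] 1 "" = "asdfghjkl" := by decide
lemma pvQl0 : PySem.List.pyGetD ["qwertyuiop", "asdfghjkl", "zxcvbnm"] 0 "" = "qwertyuiop" := by decide
lemma pvQl2 : PySem.List.pyGetD ["qwertyuiop", "asdfghjkl", "zxcvbnm"] 2 "" = "zxcvbnm" := by decide

lemma pvPortA_eq (password : String) (score : Int) :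
    querty_layout password score = pvAFoldNat (PySem.Str.lower password).toList score := by
  dsimp only [querty_layout, pvAFoldNat]
  rw [pvQl0, pvQl1, pvQl2]
  set l := (PySem.Str.lower password).toList with hl
  rw [PySem.List.pyRange_one, show ((l.length : Int) - 2 - 0).toNat = l.length - 2 by omega,
    List.foldl_map]
  apply PySem.List.foldl_congr_mem
  intro acc k hk
  have e0 : (0 : Int) + (k : Int) = ((k : Nat) : Int) := by omega
  have e1 : (0 : Int) + (k : Int) + 1 = (((k + 1) : Nat) : Int) := by omega
  have e2 : (0 : Int) + (k : Int) + 2 = (((k + 2) : Nat) : Int) := by omega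
  rw [e1, e2, e0, PySem.List.pyGetD_natCast, PySem.List.pyGetD_natCast, PySem.List.pyGetD_natCast]
  exact if_congr (by rw [pvCondIff]) rfl rfl

-- ===== VERDICT (by name: the statement is the Claim_ definition above) =====
theorem querty_layout_spec : Claim_equal_querty_layout := by
  intro password score _
  unfold Spec_querty_layout querty_layout_alt
  rw [pvPortA_eq, pvAFoldNat_eq, pvRunLoop_eq, (pvMain _).1]
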